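-- pv_equiv track=rewrite | github.com/bastionsofwill/algorithm-study | python/board_cover.py | find_new_block
-- ===== SOURCE A (Python) =====
-- def find_new_block(H, W, src, delta):
--     new_block = []
--     for spot in delta:
--         r, c = [sum(x) for x in zip(src, spot)]
--         if(r < 0 or c < 0 or r >= H or c >= W):
--             return None
--         else:
--             new_block.append((r, c))
--     return new_block
-- ===== SOURCE B (Python) =====
-- def find_new_block(H, W, src, delta):
--     rows = []
--     cols = []
--     for spot in delta:
--         r, c = [sum(x) for x in zip(src, spot)]
--         rows.append(r)
--         cols.append(c)
--     if rows and (min(rows) < 0 or max(rows) >= H or min(cols) < 0 or max(cols) >= W):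
--         return None
--     return list(zip(rows, cols))
-- ===== Notes on version B (the rewrite author's own statement) =====
-- stated objective: alternative
-- what changed: Instead of bounds-checking each cell with an early return, B splits the shifted coordinates into separate row and col lists and validates the whole set by a bounding-box test on the four extremes (min/max of rows and cols), rebuilding the result with zip.
import Mathlib
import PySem

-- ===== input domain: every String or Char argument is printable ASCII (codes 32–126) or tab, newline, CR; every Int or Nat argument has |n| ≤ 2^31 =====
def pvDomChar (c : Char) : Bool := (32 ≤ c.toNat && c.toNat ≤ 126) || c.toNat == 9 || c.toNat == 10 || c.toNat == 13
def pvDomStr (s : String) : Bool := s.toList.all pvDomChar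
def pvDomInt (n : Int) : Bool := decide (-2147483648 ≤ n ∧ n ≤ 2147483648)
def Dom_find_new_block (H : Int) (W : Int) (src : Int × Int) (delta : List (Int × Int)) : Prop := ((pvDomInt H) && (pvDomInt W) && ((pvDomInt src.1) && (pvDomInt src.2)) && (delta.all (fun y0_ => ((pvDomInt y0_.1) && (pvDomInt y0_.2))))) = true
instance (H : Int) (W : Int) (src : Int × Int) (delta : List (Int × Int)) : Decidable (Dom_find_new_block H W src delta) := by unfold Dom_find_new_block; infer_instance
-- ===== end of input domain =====

-- B validates via a bounding-box test on row/col extremes instead of A's per-cell early-return check; same return value.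

-- ===== PORT A =====
-- single loop: shift, bounds-check, early `return None` on the first out-of-bounds spot
def pvLoopA (H : Int) (W : Int) (src : Int × Int) : List (Int × Int) → List (Int × Int) → Option (List (Int × Int))
  | [], new_block => some new_block
  | (dr, dc) :: rest, new_block =>
      let r := src.1 + dr
      let c := src.2 + dc
      if r < 0 ∨ c < 0 ∨ r ≥ H ∨ c ≥ W then none
      else pvLoopA H W src rest (new_block ++ [(r, c)])

def find_new_block (H : Int) (W : Int) (src : Int × Int) (delta : List (Int × Int)) : Option (List (Int × Int)) :=
  pvLoopA H W src delta []

-- ===== PORT B =====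
-- rows/cols built in one pass, then the Python `if rows and (min(rows) < 0 or …)` bounding-box test, then `list(zip(rows, cols))`
def find_new_block_alt (H : Int) (W : Int) (src : Int × Int) (delta : List (Int × Int)) : Option (List (Int × Int)) :=
  let rows := delta.map (fun spot => src.1 + spot.1)
  let cols := delta.map (fun spot => src.2 + spot.2)
  match PySem.List.min? rows (fun x => x), PySem.List.max? rows (fun x => x),
        PySem.List.min? cols (fun x => x), PySem.List.max? cols (fun x => x) with
  | some rmin, some rmax, some cmin, some cmax =>
      if rmin < 0 ∨ rmax ≥ H ∨ cmin < 0 ∨ cmax ≥ W then none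
      else some (rows.zip cols)
  | _, _, _, _ => some (rows.zip cols)

-- ===== PRECONDITION & SPEC =====
def Spec_find_new_block (H : Int) (W : Int) (src : Int × Int) (delta : List (Int × Int)) (out : Option (List (Int × Int))) : Prop := out = find_new_block_alt H W src delta
instance (H : Int) (W : Int) (src : Int × Int) (delta : List (Int × Int)) (out : Option (List (Int × Int))) : Decidable (Spec_find_new_block H W src delta out) := by unfold Spec_find_new_block; infer_instance

-- ===== CLAIM (what is proved, stated in full; the proofs are below) =====
def Claim_equal_find_new_block : Prop := ∀ (H : Int) (W : Int) (src : Int × Int) (delta : List (Int × Int)), Dom_find_new_block H W src delta → Spec_find_new_block H W src delta (find_new_block H W src delta)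

-- ===== LEMMAS AND PROOFS =====

theorem pvLoopA_eq (H W : Int) (src : Int × Int) (delta : List (Int × Int)) :
    ∀ acc : List (Int × Int),
      pvLoopA H W src delta acc =
        (if (delta.map (fun spot => (src.1 + spot.1, src.2 + spot.2))).all
              (fun rc => decide (0 ≤ rc.1 ∧ rc.1 < H ∧ 0 ≤ rc.2 ∧ rc.2 < W))
         then some (acc ++ delta.map (fun spot => (src.1 + spot.1, src.2 + spot.2)))
         else none) := by
  induction delta with
  | nil => intro acc; simp [pvLoopA]
  | cons hd tl ih =>
      intro acc
      obtain ⟨dr, dc⟩ := hd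
      simp only [pvLoopA, List.map_cons, List.all_cons]
      by_cases hbad : src.1 + dr < 0 ∨ src.2 + dc < 0 ∨ src.1 + dr ≥ H ∨ src.2 + dc ≥ W
      · rw [if_pos hbad]
        have : ¬ (0 ≤ src.1 + dr ∧ src.1 + dr < H ∧ 0 ≤ src.2 + dc ∧ src.2 + dc < W) := by omega
        simp [this]
      · rw [if_neg hbad]
        rw [ih]
        have h2 : decide (0 ≤ src.1 + dr ∧ src.1 + dr < H ∧ 0 ≤ src.2 + dc ∧ src.2 + dc < W) = true := by
          simp only [decide_eq_true_eq]; omega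
        rw [h2, Bool.true_and]
        simp

theorem alt_canon (H W : Int) (src : Int × Int) (delta : List (Int × Int)) :
    find_new_block_alt H W src delta =
      (if (delta.map (fun spot => (src.1 + spot.1, src.2 + spot.2))).all
            (fun rc => decide (0 ≤ rc.1 ∧ rc.1 < H ∧ 0 ≤ rc.2 ∧ rc.2 < W))
       then some (delta.map (fun spot => (src.1 + spot.1, src.2 + spot.2)))
       else none) := by
  unfold find_new_block_alt
  have hzip : (delta.map (fun spot => src.1 + spot.1)).zip (delta.map (fun spot => src.2 + spot.2))
      = delta.map (fun spot => (src.1 + spot.1, src.2 + spot.2)) := by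
    rw [List.zip_map']
  cases delta with
  | nil => simp [PySem.List.min?, PySem.List.max?]
  | cons hd tl =>
      simp only at hzip
      rcases hmin : PySem.List.min? ((hd :: tl).map (fun spot => src.1 + spot.1)) (fun x => x) with _ | rmin
      · exact absurd ((PySem.List.min?_eq_none_iff _ _).mp hmin) (by simp)
      rcases hmax : PySem.List.max? ((hd :: tl).map (fun spot => src.1 + spot.1)) (fun x => x) with _ | rmax
      · exact absurd ((PySem.List.max?_eq_none_iff _ _).mp hmax) (by simp)
      rcases hcmin : PySem.List.min? ((hd :: tl).map (fun spot => src.2 + spot.2)) (fun x => x) with _ | cmin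
      · exact absurd ((PySem.List.min?_eq_none_iff _ _).mp hcmin) (by simp)
      rcases hcmax : PySem.List.max? ((hd :: tl).map (fun spot => src.2 + spot.2)) (fun x => x) with _ | cmax
      · exact absurd ((PySem.List.max?_eq_none_iff _ _).mp hcmax) (by simp)
      have hbox : (rmin < 0 ∨ rmax ≥ H ∨ cmin < 0 ∨ cmax ≥ W) ↔
          ¬ (((hd :: tl).map (fun spot => (src.1 + spot.1, src.2 + spot.2))).all
              (fun rc => decide (0 ≤ rc.1 ∧ rc.1 < H ∧ 0 ≤ rc.2 ∧ rc.2 < W)) = true) := by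
        constructor
        · rintro (h | h | h | h) hall
          · obtain ⟨_, hm, rfl⟩ := List.mem_map.mp (PySem.List.min?_mem hmin)
            have := List.all_eq_true.mp hall _ (List.mem_map.mpr ⟨_, hm, rfl⟩)
            simp only [decide_eq_true_eq] at this; omega
          · obtain ⟨_, hm, rfl⟩ := List.mem_map.mp (PySem.List.max?_mem hmax)
            have := List.all_eq_true.mp hall _ (List.mem_map.mpr ⟨_, hm, rfl⟩)
            simp only [decide_eq_true_eq] at this; omega
          · obtain ⟨_, hm, rfl⟩ := List.mem_map.mp (PySem.List.min?_mem hcmin)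
            have := List.all_eq_true.mp hall _ (List.mem_map.mpr ⟨_, hm, rfl⟩)
            simp only [decide_eq_true_eq] at this; omega
          · obtain ⟨_, hm, rfl⟩ := List.mem_map.mp (PySem.List.max?_mem hcmax)
            have := List.all_eq_true.mp hall _ (List.mem_map.mpr ⟨_, hm, rfl⟩)
            simp only [decide_eq_true_eq] at this; omega
        · intro hnall
          by_contra hok
          push_neg at hok
          apply hnall
          rw [List.all_eq_true]
          rintro rc hrc
          obtain ⟨spot, hs, rfl⟩ := List.mem_map.mp hrc
          have h1 := PySem.List.min?_isMin hmin _ (List.mem_map.mpr ⟨spot, hs, rfl⟩)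
          have h2 := PySem.List.max?_isMax hmax _ (List.mem_map.mpr ⟨spot, hs, rfl⟩)
          have h3 := PySem.List.min?_isMin hcmin _ (List.mem_map.mpr ⟨spot, hs, rfl⟩)
          have h4 := PySem.List.max?_isMax hcmax _ (List.mem_map.mpr ⟨spot, hs, rfl⟩)
          simp only [decide_eq_true_eq]
          omega
      simp only [hmin, hmax, hcmin, hcmax]
      by_cases hall : ((hd :: tl).map (fun spot => (src.1 + spot.1, src.2 + spot.2))).all
          (fun rc => decide (0 ≤ rc.1 ∧ rc.1 < H ∧ 0 ≤ rc.2 ∧ rc.2 < W)) = true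
      · rw [if_neg (fun h => (hbox.mp h) hall), if_pos hall, hzip]
      · rw [if_pos (hbox.mpr hall), if_neg hall]

-- ===== VERDICT (by name: the statement is the Claim_ definition above) =====
theorem find_new_block_spec : Claim_equal_find_new_block := by
  intro H W src delta _
  unfold Spec_find_new_block find_new_block
  rw [pvLoopA_eq, alt_canon]
  simp
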